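-- pv_equiv track=rewrite | github.com/med13foundation/monorepo | src/application/services/claim_first_metrics.py | infer_graph_trust_preset
-- ===== SOURCE A (Python) =====
-- from typing import TYPE_CHECKING, Literal
--
-- GraphTrustPreset = Literal[
--     "ALL",
--     "APPROVED_ONLY",
--     "PENDING_REVIEW",
--     "REJECTED",
--     "CUSTOM",
-- ]
--
-- def infer_graph_trust_preset(curation_statuses: list[str] | None) -> GraphTrustPreset:
--     """Infer the active trust preset from curation status filters."""
--     if curation_statuses is None:
--         return "ALL"
--     normalized = {value.strip().upper() for value in curation_statuses if value.strip()}
--     if not normalized: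
--         return "ALL"
--     if normalized == {"APPROVED"}:
--         return "APPROVED_ONLY"
--     if normalized == {"DRAFT", "UNDER_REVIEW"}:
--         return "PENDING_REVIEW"
--     if normalized == {"REJECTED", "RETRACTED"}:
--         return "REJECTED"
--     return "CUSTOM"
-- ===== SOURCE B (Python) =====
-- def infer_graph_trust_preset(curation_statuses):
--     """Single pass over the raw list with six boolean flags; no set is built."""
--     if curation_statuses is None:
--         return "ALL"
--     approved = draft = review = rejected = retracted = other = False
--     for v in curation_statuses:
--         t = v.strip()
--         if not t:
--             continue
--         u = t.upper()
--         if u == "APPROVED":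
--             approved = True
--         elif u == "DRAFT":
--             draft = True
--         elif u == "UNDER_REVIEW":
--             review = True
--         elif u == "REJECTED":
--             rejected = True
--         elif u == "RETRACTED":
--             retracted = True
--         else:
--             other = True
--     if other:
--         return "CUSTOM"
--     if approved and not (draft or review or rejected or retracted):
--         return "APPROVED_ONLY"
--     if draft and review and not (approved or rejected or retracted):
--         return "PENDING_REVIEW"
--     if rejected and retracted and not (approved or draft or review):
--         return "REJECTED"
--     if not (approved or draft or review or rejected or retracted):
--         return "ALL"
--     return "CUSTOM"
-- ===== Notes on version B (the rewrite author's own statement) =====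
-- stated objective: alternative
-- what changed: Instead of building a normalized set and comparing it against three literal sets, B makes one pass over the raw list accumulating six boolean flags (one per known status plus an 'other' flag) and decides the preset from the flag combination, never materializing a set.
import Mathlib
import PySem

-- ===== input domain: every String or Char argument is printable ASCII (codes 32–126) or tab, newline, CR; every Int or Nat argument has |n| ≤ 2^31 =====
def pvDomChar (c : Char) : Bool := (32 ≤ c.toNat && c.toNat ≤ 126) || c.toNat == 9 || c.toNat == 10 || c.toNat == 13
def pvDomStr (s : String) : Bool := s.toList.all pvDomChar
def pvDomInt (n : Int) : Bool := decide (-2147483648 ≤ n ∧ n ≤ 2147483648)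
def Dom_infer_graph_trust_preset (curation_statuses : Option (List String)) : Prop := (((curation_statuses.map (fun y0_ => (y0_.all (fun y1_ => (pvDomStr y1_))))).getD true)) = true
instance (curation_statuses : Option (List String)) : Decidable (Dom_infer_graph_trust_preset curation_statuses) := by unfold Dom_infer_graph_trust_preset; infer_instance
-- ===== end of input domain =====

-- B replaces A's set construction + chain of set-equality tests by a single pass over the raw
-- list accumulating six boolean flags and a decision on the flag combination (alternative; same cost).

-- ===== PORT A =====
-- {value.strip().upper() for value in curation_statuses if value.strip()}
def pvNormalize (xs : List String) : PySem.Set String :=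
  xs.foldl (fun s v =>
    if PySem.Str.strip v ≠ "" then PySem.Set.add s (PySem.Str.upper (PySem.Str.strip v)) else s)
    PySem.Set.empty

def infer_graph_trust_preset (curation_statuses : Option (List String)) : String :=
  match curation_statuses with
  | none => "ALL"
  | some xs =>
    let normalized := pvNormalize xs
    if normalized = [] then "ALL"
    else if PySem.Set.equal normalized (PySem.Set.ofList ["APPROVED"]) then "APPROVED_ONLY"
    else if PySem.Set.equal normalized (PySem.Set.ofList ["DRAFT", "UNDER_REVIEW"]) then "PENDING_REVIEW"
    else if PySem.Set.equal normalized (PySem.Set.ofList ["REJECTED", "RETRACTED"]) then "REJECTED"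
    else "CUSTOM"

-- ===== PORT B =====
structure PvFlags where
  approved : Bool
  draft : Bool
  review : Bool
  rejected : Bool
  retracted : Bool
  other : Bool
deriving DecidableEq, Repr

def pvStep (s : PvFlags) (v : String) : PvFlags :=
  let t := PySem.Str.strip v
  if t = "" then s
  else
    let u := PySem.Str.upper t
    if u = "APPROVED" then { s with approved := true }
    else if u = "DRAFT" then { s with draft := true }
    else if u = "UNDER_REVIEW" then { s with review := true }
    else if u = "REJECTED" then { s with rejected := true }
    else if u = "RETRACTED" then { s with retracted := true }
    else { s with other := true }

def infer_graph_trust_preset_alt (curation_statuses : Option (List String)) : String :=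
  match curation_statuses with
  | none => "ALL"
  | some xs =>
    let f := xs.foldl pvStep ⟨false, false, false, false, false, false⟩
    if f.other then "CUSTOM"
    else if f.approved && !(f.draft || f.review || f.rejected || f.retracted) then "APPROVED_ONLY"
    else if f.draft && f.review && !(f.approved || f.rejected || f.retracted) then "PENDING_REVIEW"
    else if f.rejected && f.retracted && !(f.approved || f.draft || f.review) then "REJECTED"
    else if !(f.approved || f.draft || f.review || f.rejected || f.retracted) then "ALL"
    else "CUSTOM"

-- ===== PRECONDITION & SPEC =====
def Spec_infer_graph_trust_preset (curation_statuses : Option (List String)) (out : String) : Prop := out = infer_graph_trust_preset_alt curation_statuses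
instance (curation_statuses : Option (List String)) (out : String) : Decidable (Spec_infer_graph_trust_preset curation_statuses out) := by unfold Spec_infer_graph_trust_preset; infer_instance

-- ===== CLAIM (what is proved, stated in full; the proofs are below) =====
def Claim_equal_infer_graph_trust_preset : Prop := ∀ (curation_statuses : Option (List String)), Dom_infer_graph_trust_preset curation_statuses → Spec_infer_graph_trust_preset curation_statuses (infer_graph_trust_preset curation_statuses)

-- ===== LEMMAS AND PROOFS =====

def pvKnown : List String := ["APPROVED", "DRAFT", "UNDER_REVIEW", "REJECTED", "RETRACTED"]

-- "some element of xs normalizes to t"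
def pvHas (xs : List String) (t : String) : Bool :=
  xs.any (fun v => PySem.Str.strip v ≠ "" && PySem.Str.upper (PySem.Str.strip v) == t)

-- "some element of xs normalizes to an unknown status"
def pvHasOther (xs : List String) : Bool :=
  xs.any (fun v => PySem.Str.strip v ≠ "" && decide (PySem.Str.upper (PySem.Str.strip v) ∉ pvKnown))

set_option maxHeartbeats 2000000 in
theorem pvFold_closed (xs : List String) : ∀ (s : PvFlags),
    xs.foldl pvStep s =
      ⟨s.approved || pvHas xs "APPROVED", s.draft || pvHas xs "DRAFT",
       s.review || pvHas xs "UNDER_REVIEW", s.rejected || pvHas xs "REJECTED",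
       s.retracted || pvHas xs "RETRACTED", s.other || pvHasOther xs⟩ := by
  induction xs with
  | nil => intro s; simp [pvHas, pvHasOther]
  | cons v rest ih =>
    intro s
    simp only [List.foldl_cons, ih, pvHas, pvHasOther, List.any_cons]
    unfold pvStep
    by_cases h0 : PySem.Str.strip v = ""
    · simp [h0]
    · by_cases h1 : PySem.Str.upper (PySem.Str.strip v) = "APPROVED"
      · simp [h0, h1, pvKnown, Bool.or_assoc]
      · by_cases h2 : PySem.Str.upper (PySem.Str.strip v) = "DRAFT"
        · simp [h0, h1, h2, pvKnown, Bool.or_assoc]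
        · by_cases h3 : PySem.Str.upper (PySem.Str.strip v) = "UNDER_REVIEW"
          · simp [h0, h1, h2, h3, pvKnown, Bool.or_assoc]
          · by_cases h4 : PySem.Str.upper (PySem.Str.strip v) = "REJECTED"
            · simp [h0, h1, h2, h3, h4, pvKnown, Bool.or_assoc]
            · by_cases h5 : PySem.Str.upper (PySem.Str.strip v) = "RETRACTED"
              · simp [h0, h1, h2, h3, h4, h5, pvKnown, Bool.or_assoc]
              · have b1 : (PySem.Str.upper (PySem.Str.strip v) == "APPROVED") = false := beq_eq_false_iff_ne.mpr h1
                have b2 : (PySem.Str.upper (PySem.Str.strip v) == "DRAFT") = false := beq_eq_false_iff_ne.mpr h2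
                have b3 : (PySem.Str.upper (PySem.Str.strip v) == "UNDER_REVIEW") = false := beq_eq_false_iff_ne.mpr h3
                have b4 : (PySem.Str.upper (PySem.Str.strip v) == "REJECTED") = false := beq_eq_false_iff_ne.mpr h4
                have b5 : (PySem.Str.upper (PySem.Str.strip v) == "RETRACTED") = false := beq_eq_false_iff_ne.mpr h5
                simp [h0, h1, h2, h3, h4, h5, b1, b2, b3, b4, b5, pvKnown, Bool.or_assoc]

set_option maxHeartbeats 2000000 in
theorem pvNormalize_mem (xs : List String) (t : String) :
    t ∈ pvNormalize xs ↔ pvHas xs t = true := by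
  have aux : ∀ (l : List String) (s : PySem.Set String),
      t ∈ l.foldl (fun s v =>
        if PySem.Str.strip v ≠ "" then PySem.Set.add s (PySem.Str.upper (PySem.Str.strip v)) else s) s
      ↔ t ∈ s ∨ pvHas l t = true := by
    intro l
    induction l with
    | nil => intro s; simp [pvHas]
    | cons v rest ih =>
      intro s
      rw [List.foldl_cons]
      by_cases h0 : PySem.Str.strip v = ""
      · rw [if_neg (by simp [h0]), ih]
        simp [pvHas, h0]
      · rw [if_pos (by simp [h0]), ih, PySem.Set.mem_add]
        by_cases h1 : PySem.Str.upper (PySem.Str.strip v) = t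
        · simp [pvHas, h0, h1]
        · have hh : pvHas (v :: rest) t = pvHas rest t := by
            simp [pvHas, List.any_cons, beq_eq_false_iff_ne.mpr h1]
          rw [hh]
          constructor
          · rintro ((hs | he) | hr)
            · exact Or.inl hs
            · exact absurd he.symm h1
            · exact Or.inr hr
          · rintro (hs | hr)
            · exact Or.inl (Or.inl hs)
            · exact Or.inr hr
  simpa [pvNormalize, PySem.Set.empty] using aux xs PySem.Set.empty

set_option maxHeartbeats 2000000 in
theorem pvHasOther_iff (xs : List String) :
    pvHasOther xs = true ↔ ∃ x ∈ pvNormalize xs, x ∉ pvKnown := by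
  constructor
  · intro h
    rcases List.any_eq_true.mp h with ⟨v, hv, hp⟩
    simp only [Bool.and_eq_true, decide_eq_true_eq] at hp
    refine ⟨PySem.Str.upper (PySem.Str.strip v), ?_, hp.2⟩
    rw [pvNormalize_mem]
    exact List.any_eq_true.mpr ⟨v, hv, by simp [hp.1]⟩
  · rintro ⟨x, hx, hnk⟩
    rw [pvNormalize_mem] at hx
    rcases List.any_eq_true.mp hx with ⟨v, hv, hp⟩
    simp only [Bool.and_eq_true, beq_iff_eq] at hp
    exact List.any_eq_true.mpr ⟨v, hv, by simp [hp.1, hp.2, hnk]⟩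

set_option maxHeartbeats 2000000 in
theorem pv_nil_iff (xs : List String) :
    pvNormalize xs = [] ↔
      (pvHas xs "APPROVED" = false ∧ pvHas xs "DRAFT" = false ∧ pvHas xs "UNDER_REVIEW" = false ∧
       pvHas xs "REJECTED" = false ∧ pvHas xs "RETRACTED" = false ∧ pvHasOther xs = false) := by
  constructor
  · intro h
    have m : ∀ t, pvHas xs t = true → t ∈ pvNormalize xs := fun t => (pvNormalize_mem xs t).mpr
    have f : ∀ t, pvHas xs t = false := by
      intro t
      cases hb : pvHas xs t with
      | false => rfl
      | true => exact absurd (m t hb) (by rw [h]; simp)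
    refine ⟨f _, f _, f _, f _, f _, ?_⟩
    cases hb : pvHasOther xs with
    | false => rfl
    | true =>
      rcases (pvHasOther_iff xs).mp hb with ⟨x, hx, _⟩
      rw [h] at hx
      exact absurd hx (by simp)
  · rintro ⟨h1, h2, h3, h4, h5, h6⟩
    by_contra hne
    rcases List.exists_mem_of_ne_nil _ hne with ⟨x, hx⟩
    by_cases hk : x ∈ pvKnown
    · have := (pvNormalize_mem xs x).mp hx
      fin_cases hk <;> simp_all
    · have := (pvHasOther_iff xs).mpr ⟨x, hx, hk⟩
      simp_all

-- set(normalized) == S for one of the three literal target sets, via the flags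
set_option maxHeartbeats 2000000 in
theorem pv_equal_iff (xs : List String) (ts : List String)
    (hts : ts ⊆ pvKnown) (hnd : ts.Nodup) :
    PySem.Set.equal (pvNormalize xs) (PySem.Set.ofList ts) = true ↔
      ((∀ t ∈ pvKnown, (pvHas xs t = true ↔ t ∈ ts)) ∧ pvHasOther xs = false) := by
  have hof : ∀ y, y ∈ PySem.Set.ofList ts ↔ y ∈ ts := fun y => PySem.Set.mem_ofList ts y
  rw [PySem.Set.equal_iff]
  constructor
  · intro h
    constructor
    · intro t ht
      rw [← pvNormalize_mem, h t, hof]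
    · rw [Bool.eq_false_iff]
      intro hc
      rcases (pvHasOther_iff xs).mp hc with ⟨x, hx, hnk⟩
      exact hnk (hts ((hof x).mp ((h x).mp hx)))
  · rintro ⟨hiff, hother⟩
    intro x
    rw [hof]
    constructor
    · intro hx
      by_cases hk : x ∈ pvKnown
      · exact (hiff x hk).mp ((pvNormalize_mem xs x).mp hx)
      · exact absurd ((pvHasOther_iff xs).mpr ⟨x, hx, hk⟩) (by simp [hother])
    · intro hx
      rw [pvNormalize_mem]
      exact (hiff x (hts hx)).mpr hx


set_option maxHeartbeats 2000000 in
theorem pvE1 (xs : List String) :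
    PySem.Set.equal (pvNormalize xs) (PySem.Set.ofList ["APPROVED"]) =
      (pvHas xs "APPROVED" && !pvHas xs "DRAFT" && !pvHas xs "UNDER_REVIEW" &&
       !pvHas xs "REJECTED" && !pvHas xs "RETRACTED" && !pvHasOther xs) := by
  rw [Bool.eq_iff_iff, pv_equal_iff xs ["APPROVED"] (by decide) (by decide)]
  simp [pvKnown]
  exact fun _ => ⟨fun ⟨a,b,c,d,e⟩ => ⟨⟨⟨⟨a,b⟩,c⟩,d⟩,e⟩, fun ⟨⟨⟨⟨a,b⟩,c⟩,d⟩,e⟩ => ⟨a,b,c,d,e⟩⟩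

set_option maxHeartbeats 2000000 in
theorem pvE2 (xs : List String) :
    PySem.Set.equal (pvNormalize xs) (PySem.Set.ofList ["DRAFT", "UNDER_REVIEW"]) =
      (!pvHas xs "APPROVED" && pvHas xs "DRAFT" && pvHas xs "UNDER_REVIEW" &&
       !pvHas xs "REJECTED" && !pvHas xs "RETRACTED" && !pvHasOther xs) := by
  rw [Bool.eq_iff_iff, pv_equal_iff xs ["DRAFT", "UNDER_REVIEW"] (by decide) (by decide)]
  simp [pvKnown]
  exact fun _ => ⟨fun ⟨a,b,c,d,e⟩ => ⟨⟨⟨⟨a,b⟩,c⟩,d⟩,e⟩, fun ⟨⟨⟨⟨a,b⟩,c⟩,d⟩,e⟩ => ⟨a,b,c,d,e⟩⟩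

set_option maxHeartbeats 2000000 in
theorem pvE3 (xs : List String) :
    PySem.Set.equal (pvNormalize xs) (PySem.Set.ofList ["REJECTED", "RETRACTED"]) =
      (!pvHas xs "APPROVED" && !pvHas xs "DRAFT" && !pvHas xs "UNDER_REVIEW" &&
       pvHas xs "REJECTED" && pvHas xs "RETRACTED" && !pvHasOther xs) := by
  rw [Bool.eq_iff_iff, pv_equal_iff xs ["REJECTED", "RETRACTED"] (by decide) (by decide)]
  simp [pvKnown]
  exact fun _ => ⟨fun ⟨a,b,c,d,e⟩ => ⟨⟨⟨⟨a,b⟩,c⟩,d⟩,e⟩, fun ⟨⟨⟨⟨a,b⟩,c⟩,d⟩,e⟩ => ⟨a,b,c,d,e⟩⟩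

-- ===== VERDICT (by name: the statement is the Claim_ definition above) =====
set_option maxHeartbeats 2000000 in
theorem infer_graph_trust_preset_spec : Claim_equal_infer_graph_trust_preset := by
  intro cs _dom
  unfold Spec_infer_graph_trust_preset
  cases cs with
  | none => rfl
  | some xs =>
    simp only [infer_graph_trust_preset, infer_graph_trust_preset_alt,
      pvFold_closed xs ⟨false, false, false, false, false, false⟩, Bool.false_or]
    have E1 := pvE1 xs
    have E2 := pvE2 xs
    have E3 := pvE3 xs
    have hnil := pv_nil_iff xs
    cases hA : pvHas xs "APPROVED" <;> cases hD : pvHas xs "DRAFT" <;>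
      cases hU : pvHas xs "UNDER_REVIEW" <;> cases hR : pvHas xs "REJECTED" <;>
      cases hT : pvHas xs "RETRACTED" <;> cases hO : pvHasOther xs <;>
      simp_all [pvKnown]
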